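-- pv_equiv track=rewrite | github.com/khughitt/science | scripts/audit_downstream_project_inventory.py | count_second_level
-- ===== SOURCE A (Python) =====
-- from collections import Counter
--
-- def count_second_level(
--     tracked: list[str], dirs: list[str]
-- ) -> dict[str, dict[str, int]]:
--     out: dict[str, dict[str, int]] = {}
--     for top in dirs:
--         sub: Counter[str] = Counter()
--         prefix = top + "/"
--         for path in tracked:
--             if path.startswith(prefix):
--                 rest = path[len(prefix) :]
--                 second = rest.split("/", 1)[0] if "/" in rest else "<files>"
--                 sub[second] += 1
--         if sub:
--             out[top] = dict(sorted(sub.items()))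
--     return out
-- ===== SOURCE B (Python) =====
-- def count_second_level(tracked, dirs):
--     # One pass over the paths: at each "/" inside a path, the text before it is a
--     # candidate top directory; bucket by it using a set of dirs, then emit in dirs order.
--     want = set(dirs)
--     buckets = {}
--     for path in tracked:
--         for i, ch in enumerate(path):
--             if ch == "/":
--                 top = path[:i]
--                 if top in want:
--                     rest = path[i + 1:]
--                     second = rest.split("/", 1)[0] if "/" in rest else "<files>"
--                     b = buckets.setdefault(top, {})
--                     b[second] = b.get(second, 0) + 1
--     out = {}
--     for top in dirs:
--         if top in buckets:
--             out[top] = dict(sorted(buckets[top].items()))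
--     return out
-- ===== Notes on version B (the rewrite author's own statement) =====
-- stated objective: faster
-- what changed: Instead of scanning all tracked paths once per directory (nested loops), B makes a single pass over the paths, treats the text before each '/' as a candidate top directory, checks it against a set built from dirs, and buckets counts per top, assembling the output in dirs order at the end.
import Mathlib
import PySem

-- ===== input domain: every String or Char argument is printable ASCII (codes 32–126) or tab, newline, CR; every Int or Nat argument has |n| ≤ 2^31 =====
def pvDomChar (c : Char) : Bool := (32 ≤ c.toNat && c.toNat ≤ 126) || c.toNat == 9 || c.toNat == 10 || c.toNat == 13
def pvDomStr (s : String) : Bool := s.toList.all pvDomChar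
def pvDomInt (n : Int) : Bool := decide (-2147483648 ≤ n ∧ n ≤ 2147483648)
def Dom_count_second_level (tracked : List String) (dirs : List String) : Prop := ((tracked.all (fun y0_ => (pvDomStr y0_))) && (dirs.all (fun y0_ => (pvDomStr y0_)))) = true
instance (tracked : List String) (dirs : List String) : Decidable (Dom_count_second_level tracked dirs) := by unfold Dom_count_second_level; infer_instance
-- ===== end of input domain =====

-- B replaces A's dirs×tracked nested scan by one pass over the paths that buckets counts
-- per top directory found at each '/' (objective: faster; measured).

-- shared helper: `rest.split("/", 1)[0] if "/" in rest else "<files>"` (identical expression in both Pythons)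
def pvSecondOf (rest : String) : String :=
  if PySem.Str.isIn "/" rest then ((PySem.Str.splitMax? rest "/" 1).getD []).headD "" else "<files>"

-- ===== PORT A =====
def count_second_level (tracked : List String) (dirs : List String) :
    List (String × List (String × Int)) :=
  (dirs.foldl (fun (out : PySem.Dict String (List (String × Int))) top =>
    let pre := top ++ "/"
    let sub : PySem.Dict String Int :=
      tracked.foldl (fun sub path =>
        if PySem.Str.startswith path pre then
          sub.modify (pvSecondOf (PySem.Str.slice path (some (PySem.Str.len pre)) none)) 0 (· + 1)
        else sub) PySem.Dict.empty
    if sub.items.isEmpty then out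
    else out.insert top
      (PySem.Dict.ofList (PySem.List.sorted2 sub.items (fun p => p.1) (fun p => p.2))).items)
    PySem.Dict.empty).items

-- ===== PORT B =====
-- `enumerate(path)` yields the pairs (i, ch); `List.zipIdx` holds the same pairs as (ch, i).
def count_second_level_alt (tracked : List String) (dirs : List String) :
    List (String × List (String × Int)) :=
  let want : PySem.Set String := PySem.Set.ofList dirs
  let buckets : PySem.Dict String (PySem.Dict String Int) :=
    tracked.foldl (fun buckets path =>
      path.toList.zipIdx.foldl (fun buckets ci =>
        if ci.1 == '/' then
          if want.contains (PySem.Str.slice path none (some (ci.2 : Int))) then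
            buckets.modify (PySem.Str.slice path none (some (ci.2 : Int))) PySem.Dict.empty
              (fun b =>
                b.modify (pvSecondOf (PySem.Str.slice path (some ((ci.2 : Int) + 1)) none)) 0 (· + 1))
          else buckets
        else buckets) buckets) PySem.Dict.empty
  (dirs.foldl (fun (out : PySem.Dict String (List (String × Int))) top =>
    if buckets.contains top then
      out.insert top
        (PySem.Dict.ofList (PySem.List.sorted2 (buckets.getD top PySem.Dict.empty).items
          (fun p => p.1) (fun p => p.2))).items
    else out) PySem.Dict.empty).items

-- ===== PRECONDITION & SPEC =====
def Spec_count_second_level (tracked : List String) (dirs : List String) (out : List (String × List (String × Int))) : Prop := out = count_second_level_alt tracked dirs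
instance (tracked : List String) (dirs : List String) (out : List (String × List (String × Int))) : Decidable (Spec_count_second_level tracked dirs out) := by unfold Spec_count_second_level; infer_instance

-- ===== CLAIM (what is proved, stated in full; the proofs are below) =====
def Claim_equal_count_second_level : Prop := ∀ (tracked : List String) (dirs : List String), Dom_count_second_level tracked dirs → Spec_count_second_level tracked dirs (count_second_level tracked dirs)

-- ===== LEMMAS AND PROOFS =====

-- proof-side vocabulary: B's per-pair bucket update, B's hits of one path, and the
-- list of seconds A counts for a given top, in tracked order
def pvGStep (B : PySem.Dict String (PySem.Dict String Int)) (p : String × String) :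
    PySem.Dict String (PySem.Dict String Int) :=
  B.modify p.1 PySem.Dict.empty (fun b => b.modify p.2 0 (· + 1))

def pvHit (want : PySem.Set String) (path : String) (ci : Char × Nat) : Option (String × String) :=
  if ci.1 == '/' then
    if want.contains (PySem.Str.slice path none (some (ci.2 : Int))) then
      some (PySem.Str.slice path none (some (ci.2 : Int)),
            pvSecondOf (PySem.Str.slice path (some ((ci.2 : Int) + 1)) none))
    else none
  else none

def pvHits (want : PySem.Set String) (path : String) : List (String × String) :=
  path.toList.zipIdx.filterMap (pvHit want path)

def pvL (tracked : List String) (top : String) : List String :=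
  (tracked.filter (fun path => PySem.Str.startswith path (top ++ "/"))).map
    (fun path => pvSecondOf (PySem.Str.slice path (some (PySem.Str.len (top ++ "/"))) none))

theorem pvStrExt (s t : String) (h : s.toList = t.toList) : s = t := by
  rw [← String.ofList_toList (s := s), h, String.ofList_toList]

theorem pvSliceTake (path : String) (i : Nat) :
    (PySem.Str.slice path none (some (i : Int))).toList = path.toList.take i := by
  rw [PySem.Str.toList_slice, PySem.Chars.slice_eq_listSlice, PySem.List.slice_to _ (by positivity)]
  simp

theorem pvLenPrefix (top : String) :
    PySem.Str.len (top ++ "/") = (top.toList.length : Int) + 1 := by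
  rw [PySem.Str.len_eq]; simp [String.toList_append]

theorem pvStartswith_iff (path top : String) :
    PySem.Str.startswith path (top ++ "/") = true
      ↔ (top.toList.length < path.toList.length
          ∧ path.toList.take top.toList.length = top.toList
          ∧ path.toList[top.toList.length]? = some '/') := by
  rw [PySem.Str.startswith_eq, PySem.Chars.startswith_iff,
      show (top ++ "/").toList = top.toList ++ ['/'] by rw [String.toList_append]; rfl]
  constructor
  · rintro ⟨t, ht⟩
    rw [List.append_assoc] at ht
    refine ⟨?_, ?_, ?_⟩
    · rw [← ht]; simp
    · rw [← ht, List.take_left' rfl]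
    · rw [← ht, List.getElem?_append_right (le_refl _)]
      simp
  · rintro ⟨h1, h2, h3⟩
    rw [List.prefix_iff_eq_take]
    simp only [List.length_append, List.length_cons, List.length_nil, Nat.zero_add]
    rw [List.take_add_one, h2, h3]
    rfl

theorem pvA_inner (tracked : List String) (top : String) :
    tracked.foldl (fun sub path =>
        if PySem.Str.startswith path (top ++ "/") then
          sub.modify (pvSecondOf (PySem.Str.slice path (some (PySem.Str.len (top ++ "/"))) none))
            0 (· + 1)
        else sub) PySem.Dict.empty
      = PySem.Dict.counter (pvL tracked top) := by
  rw [PySem.Dict.counter_eq_foldl, pvL, List.foldl_map, ← PySem.List.foldl_if_eq_foldl_filter]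

theorem pvB_inner (want : PySem.Set String) (path : String)
    (B0 : PySem.Dict String (PySem.Dict String Int)) :
    path.toList.zipIdx.foldl (fun buckets ci =>
        if ci.1 == '/' then
          if want.contains (PySem.Str.slice path none (some (ci.2 : Int))) then
            buckets.modify (PySem.Str.slice path none (some (ci.2 : Int))) PySem.Dict.empty
              (fun b =>
                b.modify (pvSecondOf (PySem.Str.slice path (some ((ci.2 : Int) + 1)) none)) 0 (· + 1))
          else buckets
        else buckets) B0
      = (pvHits want path).foldl pvGStep B0 := by
  rw [pvHits, List.foldl_filterMap]
  apply PySem.List.foldl_congr_mem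
  intro acc ci _
  unfold pvHit pvGStep
  by_cases h1 : (ci.1 == '/') = true
  · by_cases h2 : (want.contains (PySem.Str.slice path none (some (ci.2 : Int)))) = true
    · rw [if_pos h1, if_pos h2, if_pos h1, if_pos h2]
    · rw [if_pos h1, if_neg h2, if_pos h1, if_neg h2]
  · rw [if_neg h1, if_neg h1]

theorem pvGroup_getD (l : List (String × String)) (d : PySem.Dict String (PySem.Dict String Int))
    (t : String) :
    (l.foldl pvGStep d).getD t PySem.Dict.empty
      = ((l.filter (fun p => p.1 == t)).map (fun p => p.2)).foldl
          (fun b s => b.modify s 0 (· + 1)) (d.getD t PySem.Dict.empty) := by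
  induction l generalizing d with
  | nil => rfl
  | cons p l ih =>
    simp only [List.foldl_cons, List.filter_cons]
    by_cases h : p.1 = t
    · subst h
      simp only [BEq.rfl, if_pos]
      rw [ih, pvGStep, PySem.Dict.getD_modify_self]
      rfl
    · have hb : (p.1 == t) = false := by simp [h]
      rw [hb]
      simp only [Bool.false_eq_true, if_false]
      rw [ih, pvGStep, PySem.Dict.getD_modify_of_ne _ _ _ (Ne.symm h)]

theorem pvFilterMap_zipIdx_single {β : Type} (cs : List Char) (k n : Nat)
    (g : Char × Nat → Option β)
    (hnone : ∀ c i, k ≤ i → i < k + cs.length → i ≠ n → g (c, i) = none) :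
    (cs.zipIdx k).filterMap g
      = if h : k ≤ n ∧ n - k < cs.length then (g (cs[n - k], n)).toList else [] := by
  induction cs generalizing k with
  | nil => simp
  | cons c cs ih =>
    have hnone' : ∀ c' i, k + 1 ≤ i → i < (k + 1) + cs.length → i ≠ n → g (c', i) = none :=
      fun c' i h1 h2 h3 => hnone c' i (by omega) (by simp only [List.length_cons]; omega) h3
    rw [List.zipIdx_cons, List.filterMap_cons]
    by_cases hk : k = n
    · subst hk
      have htail : (cs.zipIdx (k + 1)).filterMap g = [] := by
        rw [ih (k + 1) hnone', dif_neg (by omega)]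
      rw [dif_pos ⟨le_refl _, by simp⟩]
      simp only [Nat.sub_self, List.getElem_cons_zero]
      cases hg : g (c, k) <;> simp [htail]
    · have hck : g (c, k) = none :=
        hnone c k (le_refl _) (by simp only [List.length_cons]; omega) hk
      rw [hck, ih (k + 1) hnone']
      by_cases hcond : (k + 1 ≤ n ∧ n - (k + 1) < cs.length)
      · rw [dif_pos hcond, dif_pos (by simp only [List.length_cons]; omega)]
        have hidx : n - k = (n - (k + 1)) + 1 := by omega
        congr 2
        simp only [hidx, List.getElem_cons_succ]
      · rw [dif_neg hcond, dif_neg (by simp only [List.length_cons]; omega)]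

-- crux: per path, the hits for a fixed top ∈ dirs are exactly A's contribution of that path
theorem pvHits_filter (dirs : List String) (path top : String) (htop : top ∈ dirs) :
    (pvHits (PySem.Set.ofList dirs) path).filter (fun p => p.1 == top)
      = if PySem.Str.startswith path (top ++ "/") then
          [(top, pvSecondOf (PySem.Str.slice path (some (PySem.Str.len (top ++ "/"))) none))]
        else [] := by
  have hw : (PySem.Set.ofList dirs).contains top = true := by
    rw [PySem.Set.contains_iff]; exact (PySem.Set.mem_ofList _ _).mpr htop
  have heval : ∀ c i, Option.filter (fun p => p.1 == top)
        (pvHit (PySem.Set.ofList dirs) path (c, i))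
      = if c = '/' ∧ path.toList.take i = top.toList then
          some (PySem.Str.slice path none (some (i : Int)),
                pvSecondOf (PySem.Str.slice path (some ((i : Int) + 1)) none))
        else none := by
    intro c i
    unfold pvHit
    dsimp only
    by_cases h1 : (c == '/') = true
    · rw [if_pos h1]
      by_cases h3 : PySem.Str.slice path none (some (i : Int)) = top
      · have htake : path.toList.take i = top.toList := by rw [← pvSliceTake path i, h3]
        rw [if_pos (show (PySem.Set.ofList dirs).contains
              (PySem.Str.slice path none (some (i : Int))) = true by rw [h3]; exact hw)]
        rw [Option.filter_some, if_pos (show ((PySem.Str.slice path none (some (i : Int)), pvSecondOf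
              (PySem.Str.slice path (some ((i : Int) + 1)) none)).1 == top) = true by
              dsimp only; rw [beq_iff_eq]; exact h3)]
        rw [if_pos ⟨beq_iff_eq.mp h1, htake⟩]
      · have htake : ¬ path.toList.take i = top.toList := fun hh =>
          h3 (pvStrExt _ _ (by rw [pvSliceTake path i]; exact hh))
        by_cases h2 : (PySem.Set.ofList dirs).contains
            (PySem.Str.slice path none (some (i : Int))) = true
        · rw [if_pos h2, Option.filter_some,
              if_neg (show ¬ ((PySem.Str.slice path none (some (i : Int)), pvSecondOf
                (PySem.Str.slice path (some ((i : Int) + 1)) none)).1 == top) = true by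
                dsimp only; rw [beq_iff_eq]; exact h3),
              if_neg (fun hh => htake hh.2)]
        · rw [if_neg h2, if_neg (fun hh => htake hh.2)]; rfl
    · rw [if_neg h1, if_neg (fun hh => h1 (beq_iff_eq.mpr hh.1))]
      rfl
  have hnone : ∀ c i, 0 ≤ i → i < 0 + path.toList.length → i ≠ top.toList.length →
      Option.filter (fun p => p.1 == top) (pvHit (PySem.Set.ofList dirs) path (c, i)) = none := by
    intro c i _ hi hne
    rw [heval c i, if_neg]
    rintro ⟨-, htake⟩
    have := congrArg List.length htake
    simp only [List.length_take] at this
    omega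
  rw [pvHits, List.filter_filterMap,
      pvFilterMap_zipIdx_single path.toList 0 top.toList.length _ hnone]
  by_cases hs : PySem.Str.startswith path (top ++ "/") = true
  · obtain ⟨h1, h2, h3⟩ := (pvStartswith_iff path top).mp hs
    rw [if_pos hs, dif_pos ⟨Nat.zero_le _, by omega⟩]
    have hcn : path.toList[top.toList.length - 0]'(by omega) = '/' := by
      have h4 := (List.getElem?_eq_getElem
        (by omega : top.toList.length < path.toList.length)).symm.trans h3
      simpa using Option.some.inj h4
    rw [heval _ _, if_pos ⟨by simpa using hcn, h2⟩]
    have hsl : PySem.Str.slice path none (some ((top.toList.length : Nat) : Int)) = top :=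
      pvStrExt _ _ (by rw [pvSliceTake path]; exact h2)
    simp only [Option.toList_some, hsl, pvLenPrefix]
  · rw [if_neg hs]
    by_cases hd : (0 ≤ top.toList.length ∧ top.toList.length - 0 < path.toList.length)
    · rw [dif_pos hd, heval _ _, if_neg]
      · rfl
      · rintro ⟨hc, htake⟩
        apply hs
        rw [pvStartswith_iff]
        refine ⟨by omega, htake, ?_⟩
        rw [List.getElem?_eq_getElem (by omega : top.toList.length < path.toList.length)]
        exact congrArg some (by simpa using hc)
    · rw [dif_neg hd]

theorem pvAllpairs_filter (tracked dirs : List String) (top : String) (htop : top ∈ dirs) :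
    ((tracked.flatMap (pvHits (PySem.Set.ofList dirs))).filter (fun p => p.1 == top)).map
        (fun p => p.2)
      = pvL tracked top := by
  rw [List.filter_flatMap, List.map_flatMap]
  induction tracked with
  | nil => rfl
  | cons path l ih =>
    rw [List.flatMap_cons, ih, pvHits_filter dirs path top htop]
    unfold pvL
    rw [List.filter_cons]
    by_cases hs : PySem.Str.startswith path (top ++ "/") = true
    · rw [if_pos hs, if_pos hs, List.map_cons, List.map_cons, List.map_nil,
          List.singleton_append]
    · rw [if_neg hs, if_neg hs, List.map_nil, List.nil_append]

theorem pvBuckets_getD (tracked dirs : List String) (top : String) (htop : top ∈ dirs) :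
    ((tracked.flatMap (pvHits (PySem.Set.ofList dirs))).foldl pvGStep PySem.Dict.empty).getD top
        PySem.Dict.empty
      = PySem.Dict.counter (pvL tracked top) := by
  rw [pvGroup_getD, PySem.Dict.getD_empty, pvAllpairs_filter tracked dirs top htop,
      PySem.Dict.counter_eq_foldl]

theorem pvBuckets_contains (tracked dirs : List String) (top : String) (htop : top ∈ dirs) :
    (((tracked.flatMap (pvHits (PySem.Set.ofList dirs))).foldl pvGStep
        PySem.Dict.empty).contains top = true)
      ↔ pvL tracked top ≠ [] := by
  have hkeys : ((tracked.flatMap (pvHits (PySem.Set.ofList dirs))).foldl pvGStep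
        PySem.Dict.empty).keys
      = PySem.Set.ofList ((tracked.flatMap (pvHits (PySem.Set.ofList dirs))).map
          (fun p => p.1)) := by
    unfold pvGStep
    rw [PySem.Dict.keys_foldl_modify_key _ (fun p : String × String => p.1) PySem.Dict.empty
        (fun _ p => fun b => b.modify p.2 0 (· + 1)), PySem.Dict.keys_empty,
        PySem.Set.update_nil_left]
  rw [PySem.Dict.contains_iff_mem_keys, hkeys, PySem.Set.mem_ofList,
      ← pvAllpairs_filter tracked dirs top htop]
  constructor
  · intro hmem hnil
    obtain ⟨p, hp, hp1⟩ := List.mem_map.mp hmem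
    have hpf : p ∈ (tracked.flatMap (pvHits (PySem.Set.ofList dirs))).filter
        (fun p => p.1 == top) :=
      List.mem_filter.mpr ⟨hp, by rw [beq_iff_eq]; exact hp1⟩
    rw [List.map_eq_nil_iff.mp hnil] at hpf
    exact absurd hpf (List.not_mem_nil)
  · intro hne
    by_contra hmem
    apply hne
    rw [List.filter_eq_nil_iff.mpr]
    · rfl
    · intro a ha hq
      exact hmem (List.mem_map.mpr ⟨a, ha, beq_iff_eq.mp hq⟩)

-- ===== VERDICT (by name: the statement is the Claim_ definition above) =====
theorem count_second_level_spec : Claim_equal_count_second_level := by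
  intro tracked dirs _
  unfold Spec_count_second_level
  simp only [count_second_level, count_second_level_alt]
  congr 1
  apply PySem.List.foldl_congr_mem
  intro acc top htop
  rw [pvA_inner tracked top]
  simp only [pvB_inner]
  rw [← List.foldl_flatMap]
  by_cases hnil : pvL tracked top = []
  · rw [hnil,
        if_pos (show (PySem.Dict.counter ([] : List String)).items.isEmpty = true from rfl),
        if_neg (fun h => (pvBuckets_contains tracked dirs top htop).mp h hnil)]
  · have hfalse : (PySem.Dict.counter (pvL tracked top)).items.isEmpty = false := by
      rw [PySem.Dict.items_counter]
      obtain ⟨x, xs, hx⟩ := List.exists_cons_of_ne_nil hnil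
      rw [hx, PySem.Set.ofList_cons, List.map_cons]
      rfl
    rw [if_neg (by simp [hfalse]),
        if_pos ((pvBuckets_contains tracked dirs top htop).mpr hnil),
        pvBuckets_getD tracked dirs top htop]
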